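-- pv_equiv track=rewrite | github.com/vibecoding-inc/xml-editor | xmleditor/xquery_engine.py | _has_balanced_braces
-- ===== SOURCE A (Python) =====
-- def _has_balanced_braces(s: str) -> bool:
--     depth = 0
--     i = 0
--     n = len(s)
--     while i < n:
--         ch = s[i]
--         if ch == '{':
--             if i + 1 < n and s[i + 1] == '{':
--                 i += 2
--                 continue
--             depth += 1
--         elif ch == '}':
--             if i + 1 < n and s[i + 1] == '}':
--                 i += 2
--                 continue
--             depth -= 1
--             if depth < 0:
--                 return False
--         i += 1
--     return depth == 0
-- ===== SOURCE B (Python) =====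
-- import re
--
-- def _has_balanced_braces(s: str) -> bool:
--     # Remove escaped (doubled) braces first; regex matching is left-to-right
--     # non-overlapping, the same greedy consumption as A's scan.
--     cleaned = re.sub(r'\{\{|\}\}', '', s)
--     depth = 0
--     for ch in cleaned:
--         if ch == '{':
--             depth += 1
--         elif ch == '}':
--             depth -= 1
--             if depth < 0:
--                 return False
--     return depth == 0
-- ===== Notes on version B (the rewrite author's own statement) =====
-- stated objective: simpler
-- what changed: B splits A's single intertwined escape-and-balance scan into two plain passes: a regex substitution that deletes all doubled-brace escapes, then a straightforward depth counter over the cleaned string.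
import Mathlib
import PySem

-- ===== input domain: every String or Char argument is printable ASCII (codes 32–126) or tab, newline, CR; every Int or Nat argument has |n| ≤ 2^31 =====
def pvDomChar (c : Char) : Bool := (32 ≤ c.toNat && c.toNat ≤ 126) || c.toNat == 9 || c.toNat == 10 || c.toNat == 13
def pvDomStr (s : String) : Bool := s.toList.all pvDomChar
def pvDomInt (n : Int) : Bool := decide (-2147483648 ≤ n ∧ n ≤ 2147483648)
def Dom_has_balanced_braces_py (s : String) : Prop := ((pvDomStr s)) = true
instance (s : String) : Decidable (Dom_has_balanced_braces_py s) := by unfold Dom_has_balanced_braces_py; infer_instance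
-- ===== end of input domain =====

-- B replaces A's single intertwined escape-and-balance scan by two plain passes:
-- strip all doubled-brace escapes first, then run a simple depth counter (simpler decomposition).

-- ===== PORT A =====
-- A's while-loop over indices, as structural recursion on the remaining characters;
-- the lookahead s[i+1] is the head of the rest of the list.
def pvScanA : List Char → Int → Bool
  | [], depth => depth == 0
  | '{' :: '{' :: rest, depth => pvScanA rest depth            -- escaped '{{': i += 2; continue
  | '{' :: rest, depth => pvScanA rest (depth + 1)
  | '}' :: '}' :: rest, depth => pvScanA rest depth            -- escaped '}}': i += 2; continue
  | '}' :: rest, depth => if depth - 1 < 0 then false else pvScanA rest (depth - 1)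
  | _ :: rest, depth => pvScanA rest depth

def has_balanced_braces_py (s : String) : Bool := pvScanA s.toList 0

-- ===== PORT B =====
-- re.sub(r'\{\{|\}\}', '', s): left-to-right non-overlapping removal of doubled braces.
def pvRemoveEsc : List Char → List Char
  | [] => []
  | '{' :: '{' :: rest => pvRemoveEsc rest
  | '}' :: '}' :: rest => pvRemoveEsc rest
  | ch :: rest => ch :: pvRemoveEsc rest

-- the plain depth-counting for-loop over the cleaned string
def pvDepthB : List Char → Int → Bool
  | [], depth => depth == 0
  | ch :: rest, depth =>
    if ch = '{' then pvDepthB rest (depth + 1)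
    else if ch = '}' then
      if depth - 1 < 0 then false else pvDepthB rest (depth - 1)
    else pvDepthB rest depth

def has_balanced_braces_py_alt (s : String) : Bool := pvDepthB (pvRemoveEsc s.toList) 0

-- ===== PRECONDITION & SPEC =====
def Spec_has_balanced_braces_py (s : String) (out : Bool) : Prop := out = has_balanced_braces_py_alt s
instance (s : String) (out : Bool) : Decidable (Spec_has_balanced_braces_py s out) := by unfold Spec_has_balanced_braces_py; infer_instance

-- ===== CLAIM (what is proved, stated in full; the proofs are below) =====
def Claim_equal_has_balanced_braces_py : Prop := ∀ (s : String), Dom_has_balanced_braces_py s → Spec_has_balanced_braces_py s (has_balanced_braces_py s)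

-- ===== LEMMAS AND PROOFS =====
-- conditional equation lemmas for the overlapping patterns of the two first passes
theorem pvScanA_open (c2 : Char) (r2 : List Char) (d : Int) (h : c2 ≠ '{') :
    pvScanA ('{' :: c2 :: r2) d = pvScanA (c2 :: r2) (d + 1) := by
  rw [pvScanA.eq_def]; split <;> ((try simp_all); (try (rename_i hA hB heq; simp_all [heq.1.symm])))

theorem pvScanA_close (c2 : Char) (r2 : List Char) (d : Int) (h : c2 ≠ '}') :
    pvScanA ('}' :: c2 :: r2) d = if d - 1 < 0 then false else pvScanA (c2 :: r2) (d - 1) := by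
  rw [pvScanA.eq_def]; split <;> ((try simp_all); (try (rename_i hA hB heq; simp_all [heq.1.symm])))

theorem pvScanA_other (ch : Char) (r : List Char) (d : Int) (h1 : ch ≠ '{') (h2 : ch ≠ '}') :
    pvScanA (ch :: r) d = pvScanA r d := by
  rw [pvScanA.eq_def]; split <;> simp_all

theorem pvRemoveEsc_open (c2 : Char) (r2 : List Char) (h : c2 ≠ '{') :
    pvRemoveEsc ('{' :: c2 :: r2) = '{' :: pvRemoveEsc (c2 :: r2) := by
  rw [pvRemoveEsc.eq_def]; split <;> ((try simp_all); (try (rename_i hA hB heq; simp_all [heq.1.symm])))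

theorem pvRemoveEsc_close (c2 : Char) (r2 : List Char) (h : c2 ≠ '}') :
    pvRemoveEsc ('}' :: c2 :: r2) = '}' :: pvRemoveEsc (c2 :: r2) := by
  rw [pvRemoveEsc.eq_def]; split <;> ((try simp_all); (try (rename_i hA hB heq; simp_all [heq.1.symm])))

theorem pvRemoveEsc_other (ch : Char) (r : List Char) (h1 : ch ≠ '{') (h2 : ch ≠ '}') :
    pvRemoveEsc (ch :: r) = ch :: pvRemoveEsc r := by
  rw [pvRemoveEsc.eq_def]; split <;> simp_all

-- A's fused scan equals B's strip-then-count, for every starting depth.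
theorem pvScanA_eq (l : List Char) (depth : Int) :
    pvScanA l depth = pvDepthB (pvRemoveEsc l) depth := by
  induction l using pvRemoveEsc.induct generalizing depth with
  | case1 => rfl
  | case2 ih | case3 ih => simp_all [pvScanA, pvRemoveEsc]
  | case4 ch rest h1 h2 ih =>
    by_cases hb : ch = '{'
    · subst hb
      cases rest with
      | nil => simp [pvScanA, pvDepthB, pvRemoveEsc]
      | cons c2 r2 =>
        have hne : c2 ≠ '{' := fun h => h1 r2 rfl (by rw [h])
        rw [pvScanA_open _ _ _ hne, pvRemoveEsc_open _ _ hne]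
        simp [pvDepthB, ih]
    by_cases hc : ch = '}'
    · subst hc
      cases rest with
      | nil => simp [pvScanA, pvDepthB, pvRemoveEsc]
      | cons c2 r2 =>
        have hne : c2 ≠ '}' := fun h => h2 r2 rfl (by rw [h])
        rw [pvScanA_close _ _ _ hne, pvRemoveEsc_close _ _ hne]
        simp [pvDepthB, ih]
    · rw [pvScanA_other _ _ _ hb hc, pvRemoveEsc_other _ _ hb hc]
      simp [pvDepthB, hb, hc, ih]


-- ===== VERDICT (by name: the statement is the Claim_ definition above) =====
theorem has_balanced_braces_py_spec : Claim_equal_has_balanced_braces_py := by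
  intro s _
  unfold Spec_has_balanced_braces_py has_balanced_braces_py has_balanced_braces_py_alt
  exact pvScanA_eq s.toList 0
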